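-- pv_equiv track=rewrite | github.com/yuanliueur/FairNM | fairnm.py | generate_merged_names
-- ===== SOURCE A (Python) =====
-- import itertools
--
-- def generate_merged_names(names):
--     merged_names = []
--     locations = list(range(len(names)))
--
--     for r in range(1, len(names) + 1):
--         combinations = itertools.combinations(locations, r)
--
--         for combination in combinations:
--             merged_name = ''.join([names[idx] for idx in combination])
--             merged_names.append((merged_name, list(combination)))
--
--     return merged_names
-- ===== SOURCE B (Python) =====
-- def generate_merged_names(names):
--     n = len(names)
--
--     def choose(i, need, acc_str, acc_idx):
--         # all (merged_string, index_list) extending acc by picking `need`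
--         # indices from i..n-1, in lexicographic order of the index lists
--         if need == 0:
--             return [(acc_str, acc_idx)]
--         if n - i < need:
--             return []
--         return (choose(i + 1, need - 1, acc_str + names[i], acc_idx + [i])
--                 + choose(i + 1, need, acc_str, acc_idx))
--
--     return [t for r in range(1, n + 1) for t in choose(0, r, '', [])]
-- ===== Notes on version B (the rewrite author's own statement) =====
-- stated objective: alternative
-- what changed: Replaces the itertools.combinations powerset loop (build each tuple, then re-index and join it) by an explicit include/exclude recursion over indices that threads the partially joined string and chosen-index list down the recursion, pruning branches that cannot reach size r.
import Mathlib
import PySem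

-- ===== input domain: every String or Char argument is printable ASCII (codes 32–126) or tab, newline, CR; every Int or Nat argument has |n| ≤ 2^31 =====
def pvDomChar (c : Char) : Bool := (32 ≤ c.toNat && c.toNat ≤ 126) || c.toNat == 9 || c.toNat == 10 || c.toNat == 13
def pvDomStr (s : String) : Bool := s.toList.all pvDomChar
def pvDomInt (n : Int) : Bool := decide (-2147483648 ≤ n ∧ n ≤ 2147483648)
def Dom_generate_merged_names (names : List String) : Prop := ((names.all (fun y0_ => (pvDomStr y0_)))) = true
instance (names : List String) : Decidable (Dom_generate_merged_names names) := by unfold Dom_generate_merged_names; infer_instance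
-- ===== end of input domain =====

-- B replaces the itertools.combinations powerset loop by an explicit include/exclude
-- recursion that threads the partial joined string and index list (objective: alternative).

-- ===== PORT A =====
-- itertools.combinations(l, r) in lexicographic order (Python-exact for distinct l)
def pyCombos (l : List Int) (r : Nat) : List (List Int) :=
  match r, l with
  | 0, _ => [[]]
  | _ + 1, [] => []
  | r + 1, x :: xs => (pyCombos xs r).map (fun c => x :: c) ++ pyCombos xs (r + 1)

def generate_merged_names (names : List String) : List (String × List Int) :=
  let locations := PySem.List.pyRange 0 (names.length : Int) 1
  (PySem.List.pyRange 1 ((names.length : Int) + 1) 1).foldl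
    (fun merged_names r =>
      (pyCombos locations r.toNat).foldl
        (fun merged_names c =>
          merged_names ++
            [(PySem.Str.join "" (c.map (fun idx => (PySem.List.pyGet? names idx).getD "")), c)])
        merged_names)
    []

-- ===== PORT B =====
-- choose(i, need, acc_str, acc_idx) from Source B; names[i] is always in range here
-- (the guard gives i < n = names.length), so List.getD is exact for Python's names[i].
def chooseB (names : List String) (n i need : Nat) (accS : String) (accI : List Int) :
    List (String × List Int) :=
  if need = 0 then [(accS, accI)]
  else if n - i < need then []
  else chooseB names n (i + 1) (need - 1) (accS ++ names.getD i "") (accI ++ [(i : Int)]) ++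
       chooseB names n (i + 1) need accS accI
termination_by n - i
decreasing_by all_goals omega

def generate_merged_names_alt (names : List String) : List (String × List Int) :=
  (PySem.List.pyRange 1 ((names.length : Int) + 1) 1).flatMap
    (fun r => chooseB names names.length 0 r.toNat "" [])

-- ===== PRECONDITION & SPEC =====
def Spec_generate_merged_names (names : List String) (out : List (String × List Int)) : Prop := out = generate_merged_names_alt names
instance (names : List String) (out : List (String × List Int)) : Decidable (Spec_generate_merged_names names out) := by unfold Spec_generate_merged_names; infer_instance

-- ===== CLAIM (what is proved, stated in full; the proofs are below) =====
def Claim_equal_generate_merged_names : Prop := ∀ (names : List String), Dom_generate_merged_names names → Spec_generate_merged_names names (generate_merged_names names)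

-- ===== LEMMAS AND PROOFS =====

theorem inter_nil {α : Type} : ∀ (l : List (List α)), List.intercalate ([] : List α) l = l.flatten
  | [] => rfl
  | [_] => by simp [List.intercalate, List.intersperse]
  | a :: b :: t => by
      have ih := inter_nil (b :: t)
      simp [List.intercalate, List.intersperse] at ih ⊢
      exact ih

theorem join_empty_nil : PySem.Str.join "" ([] : List String) = "" := by
  apply String.toList_inj.mp
  simp [pysem, PySem.Chars.join, inter_nil]

theorem join_empty_cons (a : String) (l : List String) :
    PySem.Str.join "" (a :: l) = a ++ PySem.Str.join "" l := by
  apply String.toList_inj.mp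
  simp [pysem, PySem.Chars.join, inter_nil]

theorem pyCombos_of_short : ∀ (l : List Int) (r : Nat), l.length < r → pyCombos l r = []
  | [], _ + 1, _ => rfl
  | _ :: xs, 1, h => by simp at h
  | _ :: xs, m + 2, h => by
      have hx : xs.length < m + 1 := by simp at h; omega
      have h1 : xs.length < m + 2 := by omega
      simp only [pyCombos, pyCombos_of_short xs (m + 1) hx, pyCombos_of_short xs (m + 2) h1,
        List.map_nil, List.append_nil]

-- the merged string A builds for a combination c
def joinA (names : List String) (c : List Int) : String :=
  PySem.Str.join "" (c.map (fun idx => (PySem.List.pyGet? names idx).getD ""))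

theorem choose_eq (names : List String) (i need : Nat) (accS : String) (accI : List Int) :
    chooseB names names.length i need accS accI =
      (pyCombos (PySem.List.pyRange (i : Int) (names.length : Int) 1) need).map
        (fun c => (accS ++ joinA names c, accI ++ c)) := by
  fun_induction chooseB names names.length i need accS accI with
  | case1 =>
      simp_all [pyCombos, joinA, join_empty_nil]
  | case2 i need accS accI h0 h1 =>
      rw [pyCombos_of_short]
      · rfl
      · rw [PySem.List.length_pyRange_one]; omega
  | case3 i need accS accI h0 h1 ih1 ih2 =>
      have hi : (i : Int) < (names.length : Int) := by omega
      rw [PySem.List.pyRange_one_cons hi]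
      rcases need with _ | m
      · omega
      · simp only [pyCombos, List.map_append, List.map_map]
        have hcast : ((i : Int) + 1) = ((i + 1 : Nat) : Int) := by push_cast; ring
        rw [hcast]
        simp only [Nat.add_sub_cancel] at ih1 ⊢
        rw [ih1, ih2]
        congr 1
        apply List.map_congr_left
        intro c _
        simp only [Function.comp]
        simp [pysem, joinA, join_empty_cons, String.append_assoc]

theorem generate_merged_names_spec : Claim_equal_generate_merged_names := by
  intro names _
  unfold Spec_generate_merged_names generate_merged_names generate_merged_names_alt
  simp only [PySem.List.foldl_append_singleton_eq_map]
  rw [PySem.List.foldl_append_eq_flatMap]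
  have hfun : (fun r : Int => chooseB names names.length 0 r.toNat "" []) =
      (fun r : Int =>
        (pyCombos (PySem.List.pyRange 0 (names.length : Int) 1) r.toNat).map
          (fun c =>
            (PySem.Str.join "" (c.map (fun idx => (PySem.List.pyGet? names idx).getD "")), c))) := by
    funext r
    have h0 : ((0 : Nat) : Int) = (0 : Int) := by norm_num
    rw [← h0, choose_eq names 0 r.toNat "" []]
    simp [joinA]
  rw [hfun]
  simp
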